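-- pv_equiv track=rewrite | github.com/NextGenTech-Github/Data-Analyst | Foundation/readingVertically.py | construct_string_by_char_position
-- ===== SOURCE A (Python) =====
-- def construct_string_by_char_position(arr):
--     # Initialize an empty string to hold the result
--     result = ''
--
--     # Find the length of the longest word to know the maximum number of iterations
--     max_length = max(len(word) for word in arr) if arr else 0
--
--     # Iterate over each character position
--     for i in range(max_length):
--         # Iterate over each word in the array
--         for word in arr:
--             # Check if the word has an ith character
--             if len(word) > i:
--                 # Append the ith character of the word to the result string
--                 result += word[i]
--
--     return result
-- ===== SOURCE B (Python) =====
-- def construct_string_by_char_position(arr):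
--     # Keep an ordered list of remaining suffixes; each round emits every head and
--     # drops exhausted words, so only characters that exist are ever touched.
--     out = []
--     active = [w for w in arr if w]
--     while active:
--         nxt = []
--         for w in active:
--             out.append(w[0])
--             t = w[1:]
--             if t:
--                 nxt.append(t)
--         active = nxt
--     return ''.join(out)
-- ===== Notes on version B (the rewrite author's own statement) =====
-- stated objective: alternative
-- what changed: B replaces A's per-column rescan of the whole word list (driven by a precomputed max length) with an ordered active-suffix list that drops exhausted words each round, so only present characters drive the loop.
import Mathlib
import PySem

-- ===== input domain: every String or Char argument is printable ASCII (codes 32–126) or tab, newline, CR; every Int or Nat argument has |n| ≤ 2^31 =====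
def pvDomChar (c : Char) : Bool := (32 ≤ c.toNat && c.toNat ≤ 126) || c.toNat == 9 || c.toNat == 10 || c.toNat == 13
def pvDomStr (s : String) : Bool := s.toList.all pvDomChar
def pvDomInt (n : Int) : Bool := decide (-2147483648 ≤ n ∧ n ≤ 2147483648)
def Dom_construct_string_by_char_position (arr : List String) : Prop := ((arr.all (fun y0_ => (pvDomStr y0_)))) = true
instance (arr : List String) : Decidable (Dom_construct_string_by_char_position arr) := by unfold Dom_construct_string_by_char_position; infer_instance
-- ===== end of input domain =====

-- B replaces A's per-column rescan of the whole word list by an ordered active-suffix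
-- list that drops exhausted words each round (objective: alternative).

-- ===== PORT A =====
-- result is built as a List Char (Python string concatenation), returned via String.ofList.
def construct_string_by_char_position (arr : List String) : String :=
  let max_length : Int :=
    if arr.isEmpty then 0
    else ((PySem.List.max? (arr.map (fun word => PySem.Str.len word)) (fun x => x)).getD 0)
  let result : List Char :=
    (PySem.List.pyRange 0 max_length 1).foldl (fun result i =>
      arr.foldl (fun result word =>
        if PySem.Str.len word > i then
          result ++ [PySem.List.pyGetD word.toList i ' ']
        else result) result) []
  String.ofList result

-- ===== PORT B =====
-- Termination measure for B's while loop: each round strictly shrinks Σ (|w|+1).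
theorem pvW_le (t : List (List Char)) :
    ((((t.map (fun w => w.tail)).filter (fun w => !w.isEmpty)).map (fun w => w.length + 1)).sum)
      ≤ ((t.map (fun w => w.length + 1)).sum) := by
  induction t with
  | nil => simp
  | cons a t ih =>
    rw [List.map_cons, List.filter_cons, List.map_cons, List.sum_cons]
    by_cases hd : (!a.tail.isEmpty) = true
    · rw [if_pos hd, List.map_cons, List.sum_cons]
      have h1 : a.tail.length = a.length - 1 := List.length_tail
      omega
    · rw [if_neg hd]; omega

theorem pvW_lt (active : List (List Char)) (h : active ≠ []) :
    ((((active.map (fun w => w.tail)).filter (fun w => !w.isEmpty)).map (fun w => w.length + 1)).sum)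
      < ((active.map (fun w => w.length + 1)).sum) := by
  cases active with
  | nil => exact absurd rfl h
  | cons a t =>
    have ht := pvW_le t
    rw [List.map_cons, List.filter_cons, List.map_cons, List.sum_cons]
    by_cases hd : (!a.tail.isEmpty) = true
    · rw [if_pos hd, List.map_cons, List.sum_cons]
      have h1 : a.tail.length = a.length - 1 := List.length_tail
      have h2 : a.tail ≠ [] := by simpa using hd
      have h3 : 0 < a.tail.length := List.length_pos_of_ne_nil h2
      omega
    · rw [if_neg hd]; omega

-- B's while loop: emit w[0] of every active suffix, recurse on the non-empty tails w[1:].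
def pvGoB (active : List (List Char)) : List Char :=
  if h : active = [] then []
  else
    active.map (fun w => PySem.List.pyGetD w 0 ' ') ++
      pvGoB ((active.map (fun w => PySem.List.slice w (some 1) none)).filter (fun w => !w.isEmpty))
termination_by (active.map (fun w => w.length + 1)).sum
decreasing_by
  simp only [List.map_subtype, List.unattach_attach, PySem.List.slice_from_one]
  exact pvW_lt active h

def construct_string_by_char_position_alt (arr : List String) : String :=
  String.ofList (pvGoB ((arr.map (fun w => w.toList)).filter (fun w => !w.isEmpty)))

-- ===== PRECONDITION & SPEC =====
def Spec_construct_string_by_char_position (arr : List String) (out : String) : Prop := out = construct_string_by_char_position_alt arr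
instance (arr : List String) (out : String) : Decidable (Spec_construct_string_by_char_position arr out) := by unfold Spec_construct_string_by_char_position; infer_instance

-- ===== CLAIM (what is proved, stated in full; the proofs are below) =====
def Claim_equal_construct_string_by_char_position : Prop := ∀ (arr : List String), Dom_construct_string_by_char_position arr → Spec_construct_string_by_char_position arr (construct_string_by_char_position arr)

-- ===== LEMMAS AND PROOFS =====

-- column k of a list of words: the k-th char of every word long enough, in order
def pvCol (k : Nat) (L : List (List Char)) : List Char :=
  (L.filter (fun w => decide (k < w.length))).map (fun w => w.getD k ' ')

theorem pvGoB_nil : pvGoB [] = [] := by rw [pvGoB]; rfl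

theorem pvGoB_ne (a : List (List Char)) (h : a ≠ []) :
    pvGoB a = a.map (fun w => w.getD 0 ' ') ++
      pvGoB ((a.map (fun w => w.tail)).filter (fun w => !w.isEmpty)) := by
  rw [pvGoB, dif_neg h]
  simp only [PySem.List.pyGetD_zero, PySem.List.slice_from_one]

theorem pvCol_zero (L : List (List Char)) :
    pvCol 0 L = (L.filter (fun w => !w.isEmpty)).map (fun w => w.getD 0 ' ') := by
  unfold pvCol
  have hp : ∀ w : List Char, decide (0 < w.length) = !w.isEmpty := by
    intro w; cases w <;> simp
  rw [show (fun w : List Char => decide (0 < w.length)) = (fun w => !w.isEmpty) from funext hp]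

theorem pvCol_filter (k : Nat) (M : List (List Char)) :
    pvCol k (M.filter (fun w => !w.isEmpty)) = pvCol k M := by
  unfold pvCol
  rw [List.filter_filter]
  congr 1
  apply List.filter_congr
  intro w _
  cases w <;> simp

theorem pvCol_succ (L : List (List Char)) (k : Nat) :
    pvCol (k + 1) L
      = pvCol k (((L.filter (fun w => !w.isEmpty)).map (fun w => w.tail)).filter (fun w => !w.isEmpty)) := by
  induction L with
  | nil => rfl
  | cons w L ih =>
    unfold pvCol at *
    cases w with
    | nil => simpa using ih
    | cons c cs =>
      by_cases hk : k < cs.length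
      · have hcs : cs ≠ [] := by intro h; subst h; simp at hk
        simp [hk, hcs] at ih ⊢
        exact ih
      · cases cs with
        | nil => simpa using ih
        | cons d ds =>
          have h2 : ¬ k < ds.length + 1 := by simpa using hk
          have h3 : ¬ k + 1 < ds.length + 1 + 1 := by omega
          simp [h2, h3] at ih ⊢
          exact ih

-- the heart: B's suffix loop computes the concatenation of the columns
theorem pvGoB_eq_flatMap (n : Nat) : ∀ (L : List (List Char)), (∀ w ∈ L, w.length ≤ n) →
    pvGoB (L.filter (fun w => !w.isEmpty)) = (List.range n).flatMap (fun k => pvCol k L) := by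
  induction n with
  | zero =>
    intro L hL
    have hnil : L.filter (fun w => !w.isEmpty) = [] := by
      apply List.filter_eq_nil_iff.mpr
      intro w hw
      have := hL w hw
      cases w <;> simp_all
    rw [hnil, pvGoB_nil, List.range_zero, List.flatMap_nil]
  | succ n ih =>
    intro L hL
    by_cases hM : L.filter (fun w => !w.isEmpty) = []
    · -- every word is empty: every column is empty too
      have hall : ∀ w ∈ L, w = [] := by
        intro w hw
        by_contra hne
        have : w ∈ L.filter (fun w => !w.isEmpty) := by
          apply List.mem_filter.mpr
          exact ⟨hw, by cases w <;> simp_all⟩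
        simp [hM] at this
      have hcol : ∀ k, pvCol k L = ([] : List Char) := by
        intro k
        unfold pvCol
        have : L.filter (fun w => decide (k < w.length)) = [] := by
          apply List.filter_eq_nil_iff.mpr
          intro w hw
          have := hall w hw; subst this; simp
        rw [this, List.map_nil]
      rw [hM, pvGoB_nil]
      exact (List.flatMap_eq_nil_iff.mpr (fun k _ => hcol k)).symm
    · rw [pvGoB_ne _ hM]
      rw [List.range_succ_eq_map, List.flatMap_cons, List.flatMap_map]
      congr 1
      · exact (pvCol_zero L).symm
      · set L' := (L.filter (fun w => !w.isEmpty)).map (fun w => w.tail) with hL'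
        have hb : ∀ v ∈ L', v.length ≤ n := by
          intro v hv
          rcases List.mem_map.mp hv with ⟨w, hw, rfl⟩
          have hwL : w ∈ L := (List.mem_filter.mp hw).1
          have := hL w hwL
          have := @List.length_tail _ w
          omega
        rw [ih L' hb]
        apply List.flatMap_congr
        intro k _
        rw [Nat.succ_eq_add_one, pvCol_succ L k, ← hL']
        exact (pvCol_filter k L').symm

-- A's nested loops compute the same concatenation of columns
theorem pvA_eq_flatMap (arr : List String) (N : Nat) :
    (PySem.List.pyRange 0 (N : Int) 1).foldl (fun result i =>
        arr.foldl (fun result word =>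
          if PySem.Str.len word > i then
            result ++ [PySem.List.pyGetD word.toList i ' ']
          else result) result) ([] : List Char)
      = (List.range N).flatMap (fun k => pvCol k (arr.map (fun w => w.toList))) := by
  have hinner : ∀ (k : Nat) (acc : List Char),
      arr.foldl (fun result word =>
        if PySem.Str.len word > ((k : Nat) : Int) then
          result ++ [PySem.List.pyGetD word.toList ((k : Nat) : Int) ' ']
        else result) acc = acc ++ pvCol k (arr.map (fun w => w.toList)) := by
    intro k acc
    induction arr generalizing acc with
    | nil => simp [pvCol]
    | cons w ws ihw =>
      rw [List.foldl_cons, ihw]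
      by_cases hk : k < w.toList.length
      · have hc : PySem.Str.len w > ((k : Nat) : Int) := by
          rw [PySem.Str.len_eq]; exact_mod_cast hk
        rw [if_pos hc]
        have hk2 : k < w.length := by simpa using hk
        simp [pvCol, hk2, List.append_assoc]
      · have hc : ¬ PySem.Str.len w > ((k : Nat) : Int) := by
          rw [PySem.Str.len_eq]; exact_mod_cast hk
        rw [if_neg hc]
        have hk2 : ¬ k < w.length := by simpa using hk
        simp [pvCol, hk2]
  rw [PySem.List.pyRange_one, List.foldl_map]
  have hfun : (fun (result : List Char) (k : Nat) =>
      arr.foldl (fun result word =>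
        if PySem.Str.len word > ((0 : Int) + (k : Nat)) then
          result ++ [PySem.List.pyGetD word.toList ((0 : Int) + (k : Nat)) ' ']
        else result) result)
      = fun (result : List Char) (k : Nat) => result ++ pvCol k (arr.map (fun w => w.toList)) := by
    funext acc k
    have := hinner k acc
    simpa using this
  rw [hfun, PySem.List.foldl_append_eq_flatMap]
  simp

-- ===== VERDICT (by name: the statement is the Claim_ definition above) =====
theorem construct_string_by_char_position_spec : Claim_equal_construct_string_by_char_position := by
  intro arr _hdom
  unfold Spec_construct_string_by_char_position
  simp only [construct_string_by_char_position, construct_string_by_char_position_alt]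
  cases arr with
  | nil =>
    rw [if_pos (by rfl), PySem.List.pyRange_one_eq_nil (by omega)]
    simp [pvGoB_nil]
  | cons a t =>
    rw [if_neg (by simp)]
    rw [List.map_cons, PySem.List.max?_id_cons, Option.getD_some]
    set m : Int := (List.map (fun word => PySem.Str.len word) t).foldl max (PySem.Str.len a) with hm
    have hmax : PySem.List.max? ((a :: t).map (fun word => PySem.Str.len word)) (fun x => x) = some m := by
      rw [List.map_cons, PySem.List.max?_id_cons]
    have hisMax : ∀ w ∈ (a :: t), PySem.Str.len w ≤ m := by
      intro w hw
      exact PySem.List.max?_isMax hmax _ (List.mem_map_of_mem hw)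
    have hmem : m ∈ (a :: t).map (fun word => PySem.Str.len word) := PySem.List.max?_mem hmax
    have hm0 : 0 ≤ m := by
      rcases List.mem_map.mp hmem with ⟨w, _, hwm⟩
      rw [← hwm, PySem.Str.len_eq]; positivity
    have hcast : m = ((m.toNat : Nat) : Int) := (Int.toNat_of_nonneg hm0).symm
    rw [hcast, pvA_eq_flatMap (a :: t) m.toNat]
    have hbound : ∀ w ∈ (a :: t).map (fun s => s.toList), w.length ≤ m.toNat := by
      intro w hw
      rcases List.mem_map.mp hw with ⟨s, hs, rfl⟩
      have := hisMax s hs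
      rw [PySem.Str.len_eq] at this
      omega
    rw [pvGoB_eq_flatMap m.toNat ((a :: t).map (fun s => s.toList)) hbound]
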